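-- pv_equiv track=rewrite | github.com/seochan99/python_system | WTC.py | solution
-- ===== SOURCE A (Python) =====
-- def solution(arr):
--     num=[0,0,0,0]
--     ans =[0,0,0]
--     for i in arr:
--         if i==1:
--             num[0]+=1
--         elif i == 2:
--             num[1]+=1
--         else :
--             num[2]+=1
--     num[3]=max(num)
--     ans[0]=num[3]-num[0]
--     ans[1]=num[3]-num[1]
--     ans[2]=num[3]-num[2]
--     # for i in range(num1):
--     #     arr.append(1)
--     return ans
-- ===== SOURCE B (Python) =====
-- def solution(arr):
--     cats = sorted((1 if x == 1 else 2 if x == 2 else 3) for x in arr)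
--     counts = [0, 0, 0]
--     i = 0
--     n = len(cats)
--     while i < n:
--         c = cats[i]
--         j = i
--         while j < n and cats[j] == c:
--             j += 1
--         if c == 1:
--             counts[0] = j - i
--         elif c == 2:
--             counts[1] = j - i
--         else:
--             counts[2] = j - i
--         i = j
--     m = max(counts)
--     return [m - counts[0], m - counts[1], m - counts[2]]
-- ===== Notes on version B (the rewrite author's own statement) =====
-- stated objective: alternative
-- what changed: Replaces A's single-pass if/elif tallying loop by a sort-then-scan run-length algorithm: elements are mapped to categories 1/2/3, the category list is sorted, and the counts are read off as run lengths of the sorted list with an index-based two-pointer scan.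
import Mathlib
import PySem

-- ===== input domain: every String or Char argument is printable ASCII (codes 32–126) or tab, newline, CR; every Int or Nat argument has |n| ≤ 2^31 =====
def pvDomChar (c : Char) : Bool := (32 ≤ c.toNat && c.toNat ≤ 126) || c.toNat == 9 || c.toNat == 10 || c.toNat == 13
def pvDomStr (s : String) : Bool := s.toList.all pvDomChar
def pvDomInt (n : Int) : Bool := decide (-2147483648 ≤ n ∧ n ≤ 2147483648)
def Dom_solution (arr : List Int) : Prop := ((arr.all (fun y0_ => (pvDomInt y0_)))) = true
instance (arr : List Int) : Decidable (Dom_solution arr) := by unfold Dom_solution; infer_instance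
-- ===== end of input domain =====

-- B replaces A's single-pass if/elif tallying loop with a sort-then-scan run-length
-- algorithm (map to categories, sort, read counts off as run lengths); objective: alternative.


-- ===== PORT A =====
-- for-loop over arr maintaining the three counters num[0..2]; num[3]=max(num) with num[3]=0
def solution (arr : List Int) : List Int :=
  let num := arr.foldl
    (fun (n : Int × Int × Int) i =>
      if i == 1 then (n.1 + 1, n.2.1, n.2.2)
      else if i == 2 then (n.1, n.2.1 + 1, n.2.2)
      else (n.1, n.2.1, n.2.2 + 1)) (0, 0, 0)
  let m := max (max (max num.1 num.2.1) num.2.2) 0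
  [m - num.1, m - num.2.1, m - num.2.2]

-- ===== PORT B =====
-- the generator expression (1 if x == 1 else 2 if x == 2 else 3)
def catOf (x : Int) : Int := if x == 1 then 1 else if x == 2 then 2 else 3

-- inner while: advance j while j < n and cats[j] == c  (fuel = cats.length is a pure
-- totality guard: j only moves right and stops at the end of the list)
def runEnd (cats : List Int) (c : Int) : Nat → Nat → Nat
  | 0, j => j
  | fuel + 1, j =>
    if j < cats.length ∧ cats.getD j 0 = c then runEnd cats c fuel (j + 1) else j

-- outer while: one iteration per run of equal categories, writing its length into counts
-- (fuel = cats.length again only makes the loop total: i advances by ≥ 1 per iteration)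
def scanRuns (cats : List Int) : Nat → (Int × Int × Int) → Nat → Int × Int × Int
  | 0, counts, _ => counts
  | fuel + 1, counts, i =>
    if i < cats.length then
      let c := cats.getD i 0
      let j := runEnd cats c cats.length i
      let counts' :=
        if c = 1 then ((j : Int) - (i : Int), counts.2.1, counts.2.2)
        else if c = 2 then (counts.1, (j : Int) - (i : Int), counts.2.2)
        else (counts.1, counts.2.1, (j : Int) - (i : Int))
      scanRuns cats fuel counts' j
    else counts

def solution_alt (arr : List Int) : List Int :=
  let cats := PySem.List.sorted (arr.map catOf) (fun x => x) false
  let counts := scanRuns cats cats.length (0, 0, 0) 0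
  let m := max (max counts.1 counts.2.1) counts.2.2
  [m - counts.1, m - counts.2.1, m - counts.2.2]

-- ===== PRECONDITION & SPEC =====
def Spec_solution (arr : List Int) (out : List Int) : Prop := out = solution_alt arr
instance (arr : List Int) (out : List Int) : Decidable (Spec_solution arr out) := by unfold Spec_solution; infer_instance

-- ===== CLAIM (what is proved, stated in full; the proofs are below) =====
def Claim_equal_solution : Prop := ∀ (arr : List Int), Dom_solution arr → Spec_solution arr (solution arr)

-- ===== LEMMAS AND PROOFS =====

-- A's loop state from (a,b,c) is (a + #1s, b + #2s, c + #others).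
theorem solution_loop (arr : List Int) (a b c : Int) :
    arr.foldl
      (fun (n : Int × Int × Int) i =>
        if i == 1 then (n.1 + 1, n.2.1, n.2.2)
        else if i == 2 then (n.1, n.2.1 + 1, n.2.2)
        else (n.1, n.2.1, n.2.2 + 1)) (a, b, c)
    = (a + (arr.count 1 : Int), b + (arr.count 2 : Int),
       c + ((arr.length : Int) - (arr.count 1 : Int) - (arr.count 2 : Int))) := by
  induction arr generalizing a b c with
  | nil => simp
  | cons x xs ih =>
    rw [List.foldl_cons]
    by_cases h1 : x = 1
    · rw [if_pos (by simp [h1]), ih]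
      simp [h1, Prod.ext_iff]; omega
    · by_cases h2 : x = 2
      · rw [if_neg (by simp [h1]), if_pos (by simp [h2]), ih]
        simp [h2, Prod.ext_iff]; omega
      · rw [if_neg (by simp [h1]), if_neg (by simp [h2]), ih]
        simp [h1, h2, Prod.ext_iff]; omega

-- runEnd from j advances exactly over the leading run of c's when the suffix is sorted
-- and c is a lower bound of the suffix.
theorem runEnd_eq (cats : List Int) (c : Int) :
    ∀ (fuel j : Nat), cats.length - j ≤ fuel →
    (cats.drop j).Pairwise (· ≤ ·) → (∀ y ∈ cats.drop j, c ≤ y) →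
    runEnd cats c fuel j = j + (cats.drop j).count c := by
  intro fuel
  induction fuel with
  | zero =>
    intro j hf _ _
    have hj : cats.length ≤ j := by omega
    rw [List.drop_eq_nil_of_le hj]
    simp [runEnd]
  | succ f ih =>
    intro j hf hp hle
    by_cases hj : j < cats.length
    · have hd : cats.drop j = cats[j] :: cats.drop (j + 1) := List.drop_eq_getElem_cons hj
      by_cases hc : cats[j] = c
      · rw [runEnd, if_pos ⟨hj, by rw [List.getD_eq_getElem _ _ hj]; exact hc⟩]
        rw [ih (j + 1) (by omega)
            (by rw [hd] at hp; exact hp.of_cons)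
            (by intro y hy; exact hle y (by rw [hd]; exact List.mem_cons_of_mem _ hy))]
        rw [hd, List.count_cons, hc]
        simp; omega
      · rw [runEnd,
          if_neg (fun h => hc (by rw [List.getD_eq_getElem _ _ hj] at h; exact h.2))]
        -- count c of the suffix is 0: head > c and the list is sorted
        have hcount : (cats.drop j).count c = 0 := by
          rw [List.count_eq_zero]
          intro hmem
          rw [hd] at hmem hp hle
          have hlt : c < cats[j] :=
            lt_of_le_of_ne (hle _ (List.mem_cons_self)) (fun e => hc e.symm)
          rcases List.mem_cons.mp hmem with h | h
          · omega
          · have := (List.pairwise_cons.mp hp).1 c h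
            omega
        omega
    · rw [runEnd, if_neg (fun h => absurd h.1 (by omega))]
      rw [List.drop_eq_nil_of_le (by omega : cats.length ≤ j)]
      simp

-- the first (count c) elements of a sorted list lower-bounded by c are all c …
theorem run_take (c : Int) (s : List Int) (hp : s.Pairwise (· ≤ ·))
    (hle : ∀ y ∈ s, c ≤ y) :
    s.take (s.count c) = List.replicate (s.count c) c := by
  induction s with
  | nil => simp
  | cons y t ih =>
    by_cases hy : y = c
    · subst hy
      rw [List.count_cons_self, List.take_succ_cons, List.replicate_succ]
      rw [ih hp.of_cons (fun z hz => hle z (List.mem_cons_of_mem _ hz))]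
    · have hcount : (y :: t).count c = 0 := by
        rw [List.count_eq_zero]
        intro hmem
        have hlt : c < y := lt_of_le_of_ne (hle _ List.mem_cons_self) (fun e => hy e.symm)
        rcases List.mem_cons.mp hmem with h | h
        · omega
        · have := (List.pairwise_cons.mp hp).1 c h
          omega
      simp [hcount]

-- … and c does not occur after them.
theorem run_drop (c : Int) (s : List Int) (hp : s.Pairwise (· ≤ ·))
    (hle : ∀ y ∈ s, c ≤ y) :
    c ∉ s.drop (s.count c) := by
  induction s with
  | nil => simp
  | cons y t ih =>
    by_cases hy : y = c
    · subst hy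
      rw [List.count_cons_self, List.drop_succ_cons]
      exact ih hp.of_cons (fun z hz => hle z (List.mem_cons_of_mem _ hz))
    · have hcount : (y :: t).count c = 0 := by
        rw [List.count_eq_zero]
        intro hmem
        have hlt : c < y := lt_of_le_of_ne (hle _ List.mem_cons_self) (fun e => hy e.symm)
        rcases List.mem_cons.mp hmem with h | h
        · omega
        · have := (List.pairwise_cons.mp hp).1 c h
          omega
      simp [hcount]
      have hlt : c < y := lt_of_le_of_ne (hle _ List.mem_cons_self) (fun e => hy e.symm)
      refine ⟨fun e => hy e.symm, fun hmem => ?_⟩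
      have := (List.pairwise_cons.mp hp).1 c hmem
      omega

-- the outer scan over a sorted suffix fills each present category with its count
theorem scan_eq (cats : List Int) :
    ∀ (fuel i : Nat) (a b c : Int), cats.length - i ≤ fuel →
    (cats.drop i).Pairwise (· ≤ ·) →
    (∀ y ∈ cats.drop i, y = 1 ∨ y = 2 ∨ y = 3) →
    scanRuns cats fuel (a, b, c) i =
      ((if (1 : Int) ∈ cats.drop i then ((cats.drop i).count 1 : Int) else a),
       (if (2 : Int) ∈ cats.drop i then ((cats.drop i).count 2 : Int) else b),
       (if (3 : Int) ∈ cats.drop i then ((cats.drop i).count 3 : Int) else c)) := by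
  intro fuel
  induction fuel with
  | zero =>
    intro i a b c hf _ _
    have hdrop : cats.drop i = [] := List.drop_eq_nil_of_le (by omega)
    simp [scanRuns, hdrop]
  | succ f ih =>
    intro i a b c hf hp hcat
    by_cases hi : i < cats.length
    · set s := cats.drop i with hs
      have hd : s = cats[i] :: cats.drop (i + 1) := List.drop_eq_getElem_cons hi
      set c0 := cats[i] with hc0
      have hgd : cats.getD i 0 = c0 := List.getD_eq_getElem _ _ hi
      have hlow : ∀ y ∈ s, c0 ≤ y := by
        rw [hd]
        intro y hy
        rcases List.mem_cons.mp hy with h | h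
        · omega
        · have hp' := hp; rw [hd] at hp'
          exact (List.pairwise_cons.mp hp').1 y h
      set n0 := s.count c0 with hn0
      have hre : runEnd cats c0 cats.length i = i + n0 :=
        runEnd_eq cats c0 cats.length i (by omega) hp hlow
      have hn0pos : 0 < n0 := by
        rw [hn0, hd, List.count_cons_self]; omega
      have hn0le : n0 ≤ s.length := List.count_le_length
      have hslen : s.length = cats.length - i := by rw [hs, List.length_drop]
      -- suffix after the run
      have hdrop' : cats.drop (i + n0) = s.drop n0 := by
        rw [hs, List.drop_drop, Nat.add_comm]
      set t := s.drop n0 with ht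
      have hsplit : s = List.replicate n0 c0 ++ t := by
        conv_lhs => rw [← List.take_append_drop n0 s]
        rw [← ht, run_take c0 s hp hlow]
      have hnotin : c0 ∉ t := run_drop c0 s hp hlow
      -- facts needed for the recursive call
      have hpt : (cats.drop (i + n0)).Pairwise (· ≤ ·) := by
        rw [hdrop', ht]; exact hp.sublist (List.drop_sublist _ _)
      have hcatt : ∀ y ∈ cats.drop (i + n0), y = 1 ∨ y = 2 ∨ y = 3 := by
        rw [hdrop', ht]
        intro y hy
        exact hcat y (List.mem_of_mem_drop hy)
      have hfuel : cats.length - (i + n0) ≤ f := by omega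
      -- count/membership transfer between s and t for k ≠ c0
      have htrans : ∀ k : Int, k ≠ c0 → s.count k = t.count k ∧ (k ∈ s ↔ k ∈ t) := by
        intro k hk
        constructor
        · rw [hsplit, List.count_append, List.count_replicate]
          simp [Ne.symm hk]
        · rw [hsplit, List.mem_append]
          constructor
          · rintro (h | h)
            · exact absurd (List.eq_of_mem_replicate h) hk
            · exact h
          · exact Or.inr
      have hc0s : c0 ∈ s := by rw [hd]; exact List.mem_cons_self
      have hc0cat : c0 = 1 ∨ c0 = 2 ∨ c0 = 3 := hcat c0 hc0s
      rw [scanRuns, if_pos hi]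
      simp only [hgd, hre]
      rcases hc0cat with h1 | h2 | h3
      · rw [if_pos (by rw [h1]), ih (i + n0) _ _ _ hfuel hpt hcatt, hdrop']
        have hnt : (1 : Int) ∉ t := by rw [← h1]; exact hnotin
        have hvs : (1 : Int) ∈ s := by rw [← h1]; exact hc0s
        have e1 := htrans 2 (by omega)
        have e2 := htrans 3 (by omega)
        have hcnt : ((i + n0 : Nat) : Int) - (i : Int) = (List.count (1 : Int) s : Int) := by
          rw [← h1, ← hn0]; push_cast; omega
        simp only [if_neg hnt, if_pos hvs, ← e1.1, ← e2.1, ← e1.2, ← e2.2, hcnt]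
      · rw [if_neg (by omega), if_pos (by rw [h2]), ih (i + n0) _ _ _ hfuel hpt hcatt, hdrop']
        have hnt : (2 : Int) ∉ t := by rw [← h2]; exact hnotin
        have hvs : (2 : Int) ∈ s := by rw [← h2]; exact hc0s
        have e1 := htrans 1 (by omega)
        have e2 := htrans 3 (by omega)
        have hcnt : ((i + n0 : Nat) : Int) - (i : Int) = (List.count (2 : Int) s : Int) := by
          rw [← h2, ← hn0]; push_cast; omega
        simp only [if_neg hnt, if_pos hvs, ← e1.1, ← e2.1, ← e1.2, ← e2.2, hcnt]
      · rw [if_neg (by omega), if_neg (by omega), ih (i + n0) _ _ _ hfuel hpt hcatt, hdrop']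
        have hnt : (3 : Int) ∉ t := by rw [← h3]; exact hnotin
        have hvs : (3 : Int) ∈ s := by rw [← h3]; exact hc0s
        have e1 := htrans 1 (by omega)
        have e2 := htrans 2 (by omega)
        have hcnt : ((i + n0 : Nat) : Int) - (i : Int) = (List.count (3 : Int) s : Int) := by
          rw [← h3, ← hn0]; push_cast; omega
        simp only [if_neg hnt, if_pos hvs, ← e1.1, ← e2.1, ← e1.2, ← e2.2, hcnt]
    · rw [scanRuns, if_neg hi]
      have hdrop : cats.drop i = [] := List.drop_eq_nil_of_le (by omega)
      simp [hdrop]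

-- category counts of the mapped list versus counts of the original list
theorem cat_counts (arr : List Int) :
    (arr.map catOf).count 1 = arr.count 1 ∧
    (arr.map catOf).count 2 = arr.count 2 ∧
    (arr.map catOf).count 3 + arr.count 1 + arr.count 2 = arr.length := by
  induction arr with
  | nil => simp
  | cons x xs ih =>
    by_cases h1 : x = 1
    · simp [catOf, h1, ih.1, ih.2.1]
      omega
    · by_cases h2 : x = 2
      · simp [catOf, h2, ih.1, ih.2.1]
        omega
      · simp [catOf, h1, h2, ih.1, ih.2.1]
        omega

-- ===== VERDICT (by name: the statement is the Claim_ definition above) =====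
theorem solution_spec : Claim_equal_solution := by
  intro arr _
  show _ = _
  simp only [solution, solution_alt, solution_loop]
  set cats := PySem.List.sorted (arr.map catOf) (fun x => x) false with hcats
  have hperm : cats.Perm (arr.map catOf) := PySem.List.sorted_perm _ _ _
  have hp : cats.Pairwise (· ≤ ·) := PySem.List.sorted_pairwise _ _
  have hcat : ∀ y ∈ cats, y = 1 ∨ y = 2 ∨ y = 3 := by
    intro y hy
    rcases List.mem_map.mp (hperm.mem_iff.mp hy) with ⟨x, _, rfl⟩
    by_cases h1 : x = 1
    · simp [catOf, h1]
    · by_cases h2 : x = 2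
      · simp [catOf, h2]
      · simp [catOf, h1, h2]
  have hscan := scan_eq cats cats.length 0 0 0 0 (by omega) (by simpa using hp) (by simpa using hcat)
  simp only [List.drop_zero] at hscan
  have hc1 : cats.count 1 = arr.count 1 := by rw [hperm.count_eq, (cat_counts arr).1]
  have hc2 : cats.count 2 = arr.count 2 := by rw [hperm.count_eq, (cat_counts arr).2.1]
  have hc3 : cats.count 3 + arr.count 1 + arr.count 2 = arr.length := by
    rw [hperm.count_eq]; exact (cat_counts arr).2.2
  rw [hscan]
  have hmem : ∀ (k : Int), (if k ∈ cats then ((cats.count k : Nat) : Int) else 0) = ((cats.count k : Nat) : Int) := by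
    intro k
    by_cases h : k ∈ cats
    · rw [if_pos h]
    · rw [if_neg h, List.count_eq_zero.mpr h]; simp
  simp only [zero_add, hmem]
  have h3 : ((arr.length : Int) - ((arr.count 1 : Nat) : Int) - ((arr.count 2 : Nat) : Int)) = ((cats.count 3 : Nat) : Int) := by omega
  rw [hc1, hc2, ← h3]
  have hz : (0 : Int) ≤ (arr.length : Int) - ((arr.count 1 : Nat) : Int) - ((arr.count 2 : Nat) : Int) := by omega
  rw [max_eq_left (le_trans hz (le_max_right _ _))]
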